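-- pv_equiv track=rewrite | github.com/matsjoyce/Nessy3 | nsy3/skipanalysis.py | get_post_dominating_nodes
-- ===== SOURCE A (Python) =====
-- def get_post_dominating_nodes(control_flow_graph):
--     all_nodes = set(range(len(control_flow_graph)))
--     all_nodes.add(None)
--     post_dominators = [all_nodes.copy() for _ in control_flow_graph]
--
--     changed = True
--     while changed:
--         changed = False
--         for pos in range(len(post_dominators)):
--             len_dom = len(post_dominators[pos])
--             new_nodes = all_nodes.copy()
--             for next_node in control_flow_graph[pos]:
--                 new_nodes &= post_dominators[next_node] if next_node is not None else {None}
--             new_nodes.add(pos)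
--             post_dominators[pos] = new_nodes
--             changed = changed or len(post_dominators[pos]) != len_dom
--
--     return post_dominators
-- ===== SOURCE B (Python) =====
-- def get_post_dominating_nodes(control_flow_graph):
--     n = len(control_flow_graph)
--     # escapes[x][i] = from node i an exit edge is reachable along a path avoiding x
--     escapes = []
--     for x in range(n):
--         esc = [False] * n
--         while True:
--             new = [i != x and any(s is None or esc[s] for s in control_flow_graph[i])
--                    for i in range(n)]
--             if new == esc:
--                 break
--             esc = new
--         escapes.append(esc)
--     result = []
--     for i in range(n):
--         row = {x for x in range(n)
--                if all(s is not None and not escapes[x][s] for s in control_flow_graph[i])}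
--         row.add(None)
--         row.add(i)
--         result.append(row)
--     return result
-- ===== Notes on version B (the rewrite author's own statement) =====
-- stated objective: alternative
-- what changed: A computes greatest-fixpoint post-dominator sets by repeated in-place sweeps over all nodes until no set changes size; B instead computes, for each candidate node x, a least-fixpoint boolean reachability table ('node i can reach an exit edge avoiding x') and builds every post-dominator row directly from these escape tables.
import Mathlib
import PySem

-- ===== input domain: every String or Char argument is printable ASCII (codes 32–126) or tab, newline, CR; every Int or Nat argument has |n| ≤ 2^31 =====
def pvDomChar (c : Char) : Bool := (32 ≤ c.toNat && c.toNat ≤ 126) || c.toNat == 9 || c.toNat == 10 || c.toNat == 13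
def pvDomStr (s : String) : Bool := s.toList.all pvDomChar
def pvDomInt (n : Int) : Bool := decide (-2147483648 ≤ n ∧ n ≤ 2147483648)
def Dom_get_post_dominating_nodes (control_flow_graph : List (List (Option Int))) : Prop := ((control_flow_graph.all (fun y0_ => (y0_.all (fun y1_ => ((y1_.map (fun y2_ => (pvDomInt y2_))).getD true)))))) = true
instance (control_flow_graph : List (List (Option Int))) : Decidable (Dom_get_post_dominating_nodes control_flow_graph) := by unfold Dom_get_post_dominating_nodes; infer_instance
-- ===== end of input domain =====

-- B replaces A's repeated whole-graph sweeps over shrinking post-dominator sets by, per candidate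
-- node x, a least-fixpoint boolean reachability ("can an exit edge be reached avoiding x"), from
-- which every post-dominator row is built directly (objective: alternative algorithm).

-- ===== PORT A =====
-- all_nodes = set(range(len(cfg))); all_nodes.add(None)
def pvAllNodes (n : Nat) : PySem.Set (Option Int) :=
  PySem.Set.add (PySem.Set.ofList ((List.range n).map (fun (i : Nat) => some (i : Int)))) none

-- 'post_dominators[next_node] if next_node is not None else {None}'
def pvGRow (pd : List (PySem.Set (Option Int))) (nxt : Option Int) : List (Option Int) :=
  match nxt with
  | some j => PySem.List.pyGetD pd j []
  | none => [none]

-- the inner 'new_nodes = all_nodes.copy(); for next_node in cfg[pos]: new_nodes &= …'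
def pvNewNodes (cfg : List (List (Option Int))) (pd : List (PySem.Set (Option Int))) (pos : Nat) :
    PySem.Set (Option Int) :=
  (cfg.getD pos []).foldl (fun acc nxt => PySem.Set.inter acc (pvGRow pd nxt)) (pvAllNodes cfg.length)

-- one iteration of 'for pos in range(len(post_dominators))', state = (post_dominators, changed)
def pvStepA (cfg : List (List (Option Int))) (st : List (PySem.Set (Option Int)) × Bool) (pos : Nat) :
    List (PySem.Set (Option Int)) × Bool :=
  let lenDom := (st.1.getD pos []).length
  let newNodes := PySem.Set.add (pvNewNodes cfg st.1 pos) (some (pos : Int))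
  (st.1.set pos newNodes, st.2 || !(newNodes.length == lenDom))

-- one full sweep of the 'for pos in range(…)' loop, starting with changed = False
def pvSweepA (cfg : List (List (Option Int))) (pd : List (PySem.Set (Option Int))) :
    List (PySem.Set (Option Int)) × Bool :=
  (List.range pd.length).foldl (pvStepA cfg) (pd, false)

-- 'while changed:' — the fuel is only a totality guard; it is proved sufficient on Pre_ below
def pvLoopA (cfg : List (List (Option Int))) :
    Nat → List (PySem.Set (Option Int)) → List (PySem.Set (Option Int))
  | 0, pd => pd
  | fuel + 1, pd =>
      let st := pvSweepA cfg pd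
      if st.2 then pvLoopA cfg fuel st.1 else st.1

def get_post_dominating_nodes (control_flow_graph : List (List (Option Int))) :
    List (List (Option Int)) :=
  let n := control_flow_graph.length
  pvLoopA control_flow_graph (n * n + n + 1) (List.replicate n (pvAllNodes n))

-- ===== PORT B =====
-- 'new = [i != x and any(s is None or esc[s] for s in cfg[i]) for i in range(n)]'
def pvEscStep (cfg : List (List (Option Int))) (x : Nat) (esc : List Bool) : List Bool :=
  (List.range cfg.length).map (fun i =>
    decide (i ≠ x) &&
    (cfg.getD i []).any (fun s =>
      match s with
      | none => true
      | some v => PySem.List.pyGetD esc v false))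

-- 'while True: new = [...]; if new == esc: break; esc = new' — the fuel is only a totality
-- guard; the chain of escape tables stabilises within cfg.length rounds (proved below)
def pvEscLoop (cfg : List (List (Option Int))) (x : Nat) : Nat → List Bool → List Bool
  | 0, esc => esc
  | f + 1, esc =>
      let new := pvEscStep cfg x esc
      if new == esc then esc else pvEscLoop cfg x f new

-- 'for x in range(n): esc = [False]*n; while True: …; escapes.append(esc)'
def pvEscapes (cfg : List (List (Option Int))) : List (List Bool) :=
  (List.range cfg.length).map (fun x =>
    pvEscLoop cfg x (cfg.length + 1) (List.replicate cfg.length false))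

-- 'row = {x for x in range(n) if all(…)}; row.add(None); row.add(i)'
def pvRowB (cfg : List (List (Option Int))) (escapes : List (List Bool)) (i : Nat) :
    PySem.Set (Option Int) :=
  PySem.Set.add
    (PySem.Set.add
      (PySem.Set.ofList
        (((List.range cfg.length).filter (fun x =>
            (cfg.getD i []).all (fun s =>
              match s with
              | none => false
              | some v => !(PySem.List.pyGetD (escapes.getD x []) v false)))).map
          (fun (x : Nat) => some (x : Int))))
      none)
    (some (i : Int))

def get_post_dominating_nodes_alt (control_flow_graph : List (List (Option Int))) :
    List (List (Option Int)) :=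
  let escapes := pvEscapes control_flow_graph
  (List.range control_flow_graph.length).map (pvRowB control_flow_graph escapes)

-- ===== PRECONDITION & SPEC =====
-- Pre_ admits exactly the inputs on which A returns: every successor must be None or an index
-- t with -n ≤ t < n (A raises IndexError on any other successor id).
def Pre_get_post_dominating_nodes (control_flow_graph : List (List (Option Int))) : Prop :=
  (control_flow_graph.all (fun r => r.all (fun s =>
    match s with
    | none => true
    | some t => decide (-(control_flow_graph.length : Int) ≤ t) &&
        decide (t < (control_flow_graph.length : Int))))) = true

instance (control_flow_graph : List (List (Option Int))) :
    Decidable (Pre_get_post_dominating_nodes control_flow_graph) := by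
  unfold Pre_get_post_dominating_nodes; infer_instance

def pvWitness_get_post_dominating_nodes : List (List (Option Int)) :=
  [[some 1, none], [none]]

def Spec_get_post_dominating_nodes (control_flow_graph : List (List (Option Int)))
    (out : List (List (Option Int))) : Prop :=
  out = get_post_dominating_nodes_alt control_flow_graph

instance (control_flow_graph : List (List (Option Int))) (out : List (List (Option Int))) :
    Decidable (Spec_get_post_dominating_nodes control_flow_graph out) := by
  unfold Spec_get_post_dominating_nodes; infer_instance

-- ===== CLAIM (what is proved, stated in full; the proofs are below) =====
def Claim_equal_get_post_dominating_nodes : Prop :=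
  ∀ (control_flow_graph : List (List (Option Int))),
    Dom_get_post_dominating_nodes control_flow_graph →
    Pre_get_post_dominating_nodes control_flow_graph →
    Spec_get_post_dominating_nodes control_flow_graph
      (get_post_dominating_nodes control_flow_graph)

-- ===== LEMMAS AND PROOFS =====

-- x escapes avoiding-node x from node i: a path of successor edges from i, never touching x,
-- reaching an exit (None) edge.  This is the least fixpoint B's rounds compute.
-- Python's xs[t] index normalisation for -n ≤ t < n
def pvIdx (n : Nat) (t : Int) : Nat := (if t < 0 then t + (n : Int) else t).toNat

inductive pvEsc (cfg : List (List (Option Int))) (x : Nat) : Nat → Prop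
  | exit (i : Nat) (hne : i ≠ x) (h : none ∈ cfg.getD i []) : pvEsc cfg x i
  | step (i : Nat) (t : Int) (hne : i ≠ x) (h : some t ∈ cfg.getD i [])
      (hj : pvEsc cfg x (pvIdx cfg.length t)) : pvEsc cfg x i

-- membership in 'post_dominators[s] if s is not None else {None}'
def pvMemRow (pd : List (PySem.Set (Option Int))) (s : Option Int) (y : Option Int) : Prop :=
  match s with
  | some t => y ∈ PySem.List.pyGetD pd t []
  | none => y = none

-- the value F(pd)[i] of A's update, as a membership predicate
def pvFmem (cfg : List (List (Option Int))) (pd : List (PySem.Set (Option Int))) (i : Nat)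
    (y : Option Int) : Prop :=
  y = some (i : Int) ∨ (y ∈ pvAllNodes cfg.length ∧ ∀ s ∈ cfg.getD i [], pvMemRow pd s y)

-- the target membership: y post-dominates i
def pvTmem (cfg : List (List (Option Int))) (i : Nat) (y : Option Int) : Prop :=
  y = none ∨ ∃ x : Nat, x < cfg.length ∧ y = some (x : Int) ∧ ¬ pvEsc cfg x i

-- loop invariant of A's iteration
def pvInv (cfg : List (List (Option Int))) (pd : List (PySem.Set (Option Int))) : Prop :=
  pd.length = cfg.length ∧ ∀ j < cfg.length,
    (pd.getD j []).Nodup ∧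
    (∀ y ∈ pd.getD j [], y ∈ pvAllNodes cfg.length) ∧
    (∀ y, pvTmem cfg j y → y ∈ pd.getD j []) ∧
    (∀ y, pvFmem cfg pd j y → y ∈ pd.getD j [])

def pvMu (pd : List (PySem.Set (Option Int))) : Nat := (pd.map List.length).sum


-- ---------- basic facts ----------
theorem pvCastSome_nodup (n : Nat) : ((List.range n).map (fun (i : Nat) => some (i : Int))).Nodup :=
  List.Nodup.map (by intro a b h; simpa using h) List.nodup_range

theorem pvAllNodes_eq (n : Nat) :
    pvAllNodes n = (List.range n).map (fun (i : Nat) => some (i : Int)) ++ [none] := by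
  unfold pvAllNodes
  rw [PySem.Set.ofList_eq_self_of_nodup _ (pvCastSome_nodup n), PySem.Set.add_of_not_mem]
  simp

theorem pvAllNodes_nodup (n : Nat) : (pvAllNodes n).Nodup := by
  rw [pvAllNodes_eq]
  refine List.Nodup.append (pvCastSome_nodup n) (by simp) ?_
  intro y hy
  simp only [List.mem_map] at hy
  obtain ⟨x, _, rfl⟩ := hy
  simp

theorem mem_pvAllNodes (n : Nat) (y : Option Int) :
    y ∈ pvAllNodes n ↔ y = none ∨ ∃ x : Nat, x < n ∧ y = some (x : Int) := by
  rw [pvAllNodes_eq]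
  constructor
  · intro hy
    rcases List.mem_append.1 hy with h | h
    · obtain ⟨x, hx, rfl⟩ := List.mem_map.1 h
      exact Or.inr ⟨x, List.mem_range.1 hx, rfl⟩
    · simp at h; exact Or.inl h
  · rintro (rfl | ⟨x, hx, rfl⟩)
    · simp
    · exact List.mem_append.2 (Or.inl (List.mem_map.2 ⟨x, List.mem_range.2 hx, rfl⟩))

theorem pvMemRow_iff (pd : List (PySem.Set (Option Int))) (s y : Option Int) :
    pvMemRow pd s y ↔ y ∈ pvGRow pd s := by
  cases s <;> simp [pvMemRow, pvGRow]

theorem pvPre_valid {cfg : List (List (Option Int))}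
    (h : Pre_get_post_dominating_nodes cfg) (i : Nat) (s : Option Int)
    (hs : s ∈ cfg.getD i []) :
    s = none ∨ ∃ t : Int, s = some t ∧
      -(cfg.length : Int) ≤ t ∧ t < (cfg.length : Int) := by
  unfold Pre_get_post_dominating_nodes at h
  simp only [List.all_eq_true] at h
  by_cases hi : i < cfg.length
  · have hrow : cfg.getD i [] ∈ cfg := by
      rw [List.getD_eq_getElem _ _ hi]; exact List.getElem_mem _
    have := h _ hrow _ hs
    cases s with
    | none => exact Or.inl rfl
    | some t =>
        simp only [Bool.and_eq_true, decide_eq_true_eq] at this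
        exact Or.inr ⟨t, rfl, this.1, this.2⟩
  · rw [List.getD_eq_default] at hs
    · simp at hs
    · omega

theorem pvIdx_lt (n : Nat) (t : Int) (h1 : -(n : Int) ≤ t) (h2 : t < n) : pvIdx n t < n := by
  unfold pvIdx
  split <;> omega

theorem pvPyGetD_idx {α : Type} (l : List α) (t : Int) (d : α)
    (h1 : -(l.length : Int) ≤ t) (h2 : t < l.length) :
    PySem.List.pyGetD l t d = l.getD (pvIdx l.length t) d := by
  unfold PySem.List.pyGetD PySem.List.pyGet? pvIdx
  rw [show PySem.List.pyIdx? l.length t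
      = some ((if t < 0 then t + (l.length : Int) else t).toNat) from ?_]
  · simp [List.getD_eq_getElem?_getD]
  · unfold PySem.List.pyIdx?
    by_cases h0 : 0 ≤ t
    · rw [if_pos h0, if_pos (by omega)]
      congr 1
      rw [if_neg (by omega)]
    · rw [if_neg h0, if_pos (by omega)]
      congr 1
      rw [if_pos (by omega)]
      omega

theorem pvPyGetD_idx' {α : Type} {n : Nat} (l : List α) (hlen : l.length = n) (t : Int) (d : α)
    (h1 : -(n : Int) ≤ t) (h2 : t < n) :
    PySem.List.pyGetD l t d = l.getD (pvIdx n t) d := by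
  subst hlen
  exact pvPyGetD_idx l t d h1 h2

theorem pvRow_nonempty_lt {cfg : List (List (Option Int))} {i : Nat} {s : Option Int}
    (hs : s ∈ cfg.getD i []) : i < cfg.length := by
  by_contra h
  rw [List.getD_eq_default] at hs
  · simp at hs
  · omega


-- ---------- the update value of A ----------
theorem pvFoldl_inter_filter (g : Option Int → List (Option Int)) (l : List (Option Int)) :
    ∀ (a : List (Option Int)),
      l.foldl (fun acc s => PySem.Set.inter acc (g s)) a
        = a.filter (fun y => l.all (fun s => (g s).contains y)) := by
  induction l with
  | nil => intro a; simp
  | cons s rest ih =>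
      intro a
      simp only [List.foldl_cons]
      rw [ih, PySem.Set.inter, List.filter_filter]
      apply List.filter_congr
      intro y _
      simp [Bool.and_comm]

theorem pvNewNodes_eq (cfg : List (List (Option Int))) (pd : List (PySem.Set (Option Int)))
    (pos : Nat) :
    pvNewNodes cfg pd pos
      = (pvAllNodes cfg.length).filter
          (fun y => (cfg.getD pos []).all (fun s => (pvGRow pd s).contains y)) := by
  unfold pvNewNodes
  exact pvFoldl_inter_filter (pvGRow pd) (cfg.getD pos []) (pvAllNodes cfg.length)

theorem mem_pvNewNodes (cfg : List (List (Option Int))) (pd : List (PySem.Set (Option Int)))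
    (pos : Nat) (y : Option Int) :
    y ∈ pvNewNodes cfg pd pos
      ↔ y ∈ pvAllNodes cfg.length ∧ ∀ s ∈ cfg.getD pos [], pvMemRow pd s y := by
  rw [pvNewNodes_eq, List.mem_filter]
  simp only [List.all_eq_true, List.contains_iff_mem]
  constructor
  · exact fun ⟨h1, h2⟩ => ⟨h1, fun s hs => (pvMemRow_iff pd s y).2 (h2 s hs)⟩
  · exact fun ⟨h1, h2⟩ => ⟨h1, fun s hs => (pvMemRow_iff pd s y).1 (h2 s hs)⟩

theorem mem_pvNew (cfg : List (List (Option Int))) (pd : List (PySem.Set (Option Int)))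
    (pos : Nat) (y : Option Int) :
    y ∈ PySem.Set.add (pvNewNodes cfg pd pos) (some (pos : Int)) ↔ pvFmem cfg pd pos y := by
  rw [PySem.Set.mem_add, mem_pvNewNodes]
  unfold pvFmem
  tauto

theorem pvNew_nodup (cfg : List (List (Option Int))) (pd : List (PySem.Set (Option Int)))
    (pos : Nat) :
    (PySem.Set.add (pvNewNodes cfg pd pos) (some (pos : Int))).Nodup := by
  apply PySem.Set.nodup_add
  rw [pvNewNodes_eq]
  exact List.Nodup.filter _ (pvAllNodes_nodup _)

theorem pvNew_sub (cfg : List (List (Option Int))) (pd : List (PySem.Set (Option Int)))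
    (pos : Nat) (hpos : pos < cfg.length) :
    ∀ y ∈ PySem.Set.add (pvNewNodes cfg pd pos) (some (pos : Int)), y ∈ pvAllNodes cfg.length := by
  intro y hy
  rcases (mem_pvNew cfg pd pos y).1 hy with rfl | ⟨h, _⟩
  · exact (mem_pvAllNodes _ _).2 (Or.inr ⟨pos, hpos, rfl⟩)
  · exact h

theorem pvMemRow_some {n : Nat} (pd : List (PySem.Set (Option Int))) (hlen : pd.length = n)
    {t : Int} (h1 : -(n : Int) ≤ t) (h2 : t < n) (y : Option Int) :
    pvMemRow pd (some t) y ↔ y ∈ pd.getD (pvIdx n t) [] := by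
  simp only [pvMemRow]
  rw [pvPyGetD_idx' pd hlen t [] h1 h2]

theorem pvFmem_mono (cfg : List (List (Option Int))) {pd pd' : List (PySem.Set (Option Int))}
    (hPre : Pre_get_post_dominating_nodes cfg)
    (hlen : pd.length = cfg.length) (hlen' : pd'.length = cfg.length)
    (hsub : ∀ j < cfg.length, ∀ y, y ∈ pd'.getD j [] → y ∈ pd.getD j []) :
    ∀ i y, pvFmem cfg pd' i y → pvFmem cfg pd i y := by
  intro i y h
  rcases h with rfl | ⟨hy, hall⟩
  · exact Or.inl rfl
  · refine Or.inr ⟨hy, fun s hs => ?_⟩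
    rcases pvPre_valid hPre i s hs with rfl | ⟨t, rfl, hb1, hb2⟩
    · exact hall _ hs
    · have hm := hall _ hs
      rw [pvMemRow_some pd' hlen' hb1 hb2] at hm
      rw [pvMemRow_some pd hlen hb1 hb2]
      exact hsub _ (pvIdx_lt _ _ hb1 hb2) y hm

-- ---------- list surgery helpers ----------
theorem pvGetD_set_self {α : Type} (pd : List α) (p : Nat) (r d : α)
    (h : p < pd.length) : (pd.set p r).getD p d = r := by
  rw [List.getD_eq_getElem?_getD, List.getElem?_set_self h]; rfl

theorem pvGetD_set_ne {α : Type} (pd : List α) {p j : Nat} (r d : α)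
    (h : p ≠ j) : (pd.set p r).getD j d = pd.getD j d := by
  rw [List.getD_eq_getElem?_getD, List.getElem?_set_ne h, ← List.getD_eq_getElem?_getD]

theorem pvMu_set (pd : List (PySem.Set (Option Int))) (p : Nat) (r : PySem.Set (Option Int))
    (h : p < pd.length) :
    pvMu (pd.set p r) + (pd.getD p []).length = pvMu pd + r.length := by
  induction pd generalizing p with
  | nil => simp at h
  | cons hd tl ih =>
      cases p with
      | zero => simp [pvMu]; omega
      | succ q =>
          simp only [List.set_cons_succ, pvMu, List.map_cons, List.sum_cons, List.getD_cons_succ]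
          have := ih q (by simpa using h)
          simp only [pvMu] at this
          omega

theorem pvMemEq_of_subset_len {α : Type} [DecidableEq α] {l₁ l₂ : List α}
    (h1 : l₁.Nodup) (h2 : l₁ ⊆ l₂) (h3 : l₂.length ≤ l₁.length) :
    ∀ y, y ∈ l₂ ↔ y ∈ l₁ :=
  fun _ => ((List.subperm_of_subset h1 h2).perm_of_length_le h3).mem_iff.symm


-- ---------- the invariant is preserved by one update ----------
theorem pvTmem_sub_new (cfg : List (List (Option Int)))
    (hPre : Pre_get_post_dominating_nodes cfg) {pd : List (PySem.Set (Option Int))}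
    (hInv : pvInv cfg pd) {pos : Nat} :
    ∀ y, pvTmem cfg pos y → pvFmem cfg pd pos y := by
  intro y hy
  rcases hy with rfl | ⟨x, hx, rfl, hnesc⟩
  · refine Or.inr ⟨(mem_pvAllNodes _ _).2 (Or.inl rfl), fun s hs => ?_⟩
    rcases pvPre_valid hPre pos s hs with rfl | ⟨t, rfl, hb1, hb2⟩
    · simp [pvMemRow]
    · rw [pvMemRow_some pd hInv.1 hb1 hb2]
      exact (hInv.2 _ (pvIdx_lt _ _ hb1 hb2)).2.2.1 none (Or.inl rfl)
  · by_cases hxp : x = pos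
    · subst hxp; exact Or.inl rfl
    · refine Or.inr ⟨(mem_pvAllNodes _ _).2 (Or.inr ⟨x, hx, rfl⟩), fun s hs => ?_⟩
      rcases pvPre_valid hPre pos s hs with rfl | ⟨t, rfl, hb1, hb2⟩
      · exact absurd (pvEsc.exit pos (fun h => hxp h.symm) hs) hnesc
      · rw [pvMemRow_some pd hInv.1 hb1 hb2]
        have hnescj : ¬ pvEsc cfg x (pvIdx cfg.length t) :=
          fun h => hnesc (pvEsc.step pos t (fun h' => hxp h'.symm) hs h)
        exact (hInv.2 _ (pvIdx_lt _ _ hb1 hb2)).2.2.1 _ (Or.inr ⟨x, hx, rfl, hnescj⟩)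

theorem pvInv_set (cfg : List (List (Option Int)))
    (hPre : Pre_get_post_dominating_nodes cfg) {pd : List (PySem.Set (Option Int))}
    (hInv : pvInv cfg pd) {pos : Nat} (hpos : pos < cfg.length) :
    pvInv cfg (pd.set pos (PySem.Set.add (pvNewNodes cfg pd pos) (some (pos : Int)))) ∧
    (∀ y ∈ PySem.Set.add (pvNewNodes cfg pd pos) (some (pos : Int)), y ∈ pd.getD pos []) := by
  set new := PySem.Set.add (pvNewNodes cfg pd pos) (some (pos : Int)) with hnew
  have hsubnew : ∀ y ∈ new, y ∈ pd.getD pos [] :=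
    fun y hy => (hInv.2 pos hpos).2.2.2 y ((mem_pvNew cfg pd pos y).1 hy)
  have hlen : (pd.set pos new).length = cfg.length := by simp [hInv.1]
  have hposlen : pos < pd.length := by rw [hInv.1]; exact hpos
  have hrows : ∀ j, j < cfg.length →
      (pd.set pos new).getD j [] = if pos = j then new else pd.getD j [] := by
    intro j _
    by_cases hpj : pos = j
    · subst hpj; rw [if_pos rfl, pvGetD_set_self pd pos new [] hposlen]
    · rw [if_neg hpj, pvGetD_set_ne pd new [] hpj]
  have hsub : ∀ j, j < cfg.length →
      ∀ y, y ∈ (pd.set pos new).getD j [] → y ∈ pd.getD j [] := by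
    intro j hj y hy
    rw [hrows j hj] at hy
    by_cases hpj : pos = j
    · subst hpj; rw [if_pos rfl] at hy; exact hsubnew y hy
    · rw [if_neg hpj] at hy; exact hy
  refine ⟨⟨hlen, fun j hj => ?_⟩, hsubnew⟩
  rw [hrows j hj]
  by_cases hpj : pos = j
  · subst hpj
    rw [if_pos rfl]
    refine ⟨pvNew_nodup cfg pd pos, pvNew_sub cfg pd pos hpos, ?_, ?_⟩
    · intro y hy
      exact (mem_pvNew cfg pd pos y).2 (pvTmem_sub_new cfg hPre hInv y hy)
    · intro y hy
      exact (mem_pvNew cfg pd pos y).2 (pvFmem_mono cfg hPre hInv.1 hlen hsub pos y hy)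
  · rw [if_neg hpj]
    obtain ⟨h1, h2, h3, h4⟩ := hInv.2 j hj
    exact ⟨h1, h2, h3, fun y hy => h4 y (pvFmem_mono cfg hPre hInv.1 hlen hsub j y hy)⟩


-- ---------- sweep lemmas ----------
theorem pvStepA_def (cfg : List (List (Option Int))) (st : List (PySem.Set (Option Int)) × Bool)
    (pos : Nat) :
    pvStepA cfg st pos =
      (st.1.set pos (PySem.Set.add (pvNewNodes cfg st.1 pos) (some (pos : Int))),
       st.2 || !((PySem.Set.add (pvNewNodes cfg st.1 pos) (some (pos : Int))).length
                   == (st.1.getD pos []).length)) := rfl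

theorem pvSweep_inv_mu (cfg : List (List (Option Int)))
    (hPre : Pre_get_post_dominating_nodes cfg) :
    ∀ (l : List Nat), (∀ p ∈ l, p < cfg.length) →
      ∀ pd b, pvInv cfg pd →
        pvInv cfg (l.foldl (pvStepA cfg) (pd, b)).1 ∧
        pvMu (l.foldl (pvStepA cfg) (pd, b)).1 ≤ pvMu pd := by
  intro l
  induction l with
  | nil => intro _ pd b hInv; exact ⟨hInv, le_rfl⟩
  | cons p rest ih =>
      intro hl pd b hInv
      have hp : p < cfg.length := hl p (List.mem_cons_self ..)
      obtain ⟨hInv', hsubnew⟩ := pvInv_set cfg hPre hInv hp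
      have hnlen : (PySem.Set.add (pvNewNodes cfg pd p) (some (p : Int))).length
          ≤ (pd.getD p []).length :=
        (List.subperm_of_subset (pvNew_nodup cfg pd p) hsubnew).length_le
      have hmu : pvMu (pd.set p (PySem.Set.add (pvNewNodes cfg pd p) (some (p : Int)))) ≤ pvMu pd := by
        have := pvMu_set pd p (PySem.Set.add (pvNewNodes cfg pd p) (some (p : Int)))
          (by rw [hInv.1]; exact hp)
        omega
      simp only [List.foldl_cons, pvStepA_def]
      obtain ⟨h1, h2⟩ := ih (fun q hq => hl q (List.mem_cons_of_mem _ hq)) _ _ hInv'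
      exact ⟨h1, le_trans h2 hmu⟩

theorem pvSweep_flagmono (cfg : List (List (Option Int))) :
    ∀ (l : List Nat) pd b, (l.foldl (pvStepA cfg) (pd, b)).2 = false → b = false := by
  intro l
  induction l with
  | nil => intro pd b h; exact h
  | cons p rest ih =>
      intro pd b h
      simp only [List.foldl_cons, pvStepA_def] at h
      have := ih _ _ h
      exact (Bool.or_eq_false_iff.1 this).1

theorem pvBool_eq_of_iff {a b : Bool} (h : a = true ↔ b = true) : a = b := by
  cases a <;> cases b <;> simp_all

theorem pvNewNodes_congr (cfg : List (List (Option Int)))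
    (hPre : Pre_get_post_dominating_nodes cfg) {pd pd' : List (PySem.Set (Option Int))}
    (hlen : pd.length = cfg.length) (hlen' : pd'.length = cfg.length)
    (hmem : ∀ j < cfg.length, ∀ y, y ∈ pd'.getD j [] ↔ y ∈ pd.getD j []) (pos : Nat) :
    pvNewNodes cfg pd' pos = pvNewNodes cfg pd pos := by
  rw [pvNewNodes_eq, pvNewNodes_eq]
  apply List.filter_congr
  intro y _
  apply pvBool_eq_of_iff
  rw [List.all_eq_true, List.all_eq_true]
  have key : ∀ s ∈ cfg.getD pos [],
      ((pvGRow pd' s).contains y = true ↔ (pvGRow pd s).contains y = true) := by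
    intro s hs
    rcases pvPre_valid hPre pos s hs with rfl | ⟨t, rfl, hb1, hb2⟩
    · exact Iff.rfl
    · show (PySem.List.pyGetD pd' t []).contains y = true
        ↔ (PySem.List.pyGetD pd t []).contains y = true
      rw [pvPyGetD_idx' pd' hlen' t [] hb1 hb2, pvPyGetD_idx' pd hlen t [] hb1 hb2,
        PySem.Set.contains_iff, PySem.Set.contains_iff]
      exact hmem _ (pvIdx_lt _ _ hb1 hb2) y
  constructor
  · exact fun h s hs => (key s hs).1 (h s hs)
  · exact fun h s hs => (key s hs).2 (h s hs)

theorem pvSweep_stable (cfg : List (List (Option Int)))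
    (hPre : Pre_get_post_dominating_nodes cfg) :
    ∀ (l : List Nat), (∀ p ∈ l, p < cfg.length) → l.Nodup →
      ∀ pd, pvInv cfg pd →
        (l.foldl (pvStepA cfg) (pd, false)).2 = false →
        (∀ j : Nat, j ∉ l → (l.foldl (pvStepA cfg) (pd, false)).1.getD j [] = pd.getD j []) ∧
        (∀ j < cfg.length, ∀ y,
            y ∈ (l.foldl (pvStepA cfg) (pd, false)).1.getD j [] ↔ y ∈ pd.getD j []) ∧
        (∀ p ∈ l, (l.foldl (pvStepA cfg) (pd, false)).1.getD p []
            = PySem.Set.add (pvNewNodes cfg pd p) (some (p : Int))) := by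
  intro l
  induction l with
  | nil =>
      intro _ _ pd _ _
      exact ⟨fun j _ => rfl, fun j _ y => Iff.rfl, by simp⟩
  | cons p rest ih =>
      intro hl hnd pd hInv hflag
      have hp : p < cfg.length := hl p (List.mem_cons_self ..)
      have hplen : p < pd.length := by rw [hInv.1]; exact hp
      simp only [List.foldl_cons, pvStepA_def, Bool.false_or] at hflag ⊢
      set new := PySem.Set.add (pvNewNodes cfg pd p) (some (p : Int)) with hnewdef
      set pd1 := pd.set p new with hpd1
      have hb0 : (!(new.length == (pd.getD p []).length)) = false :=
        pvSweep_flagmono cfg rest pd1 _ hflag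
      rw [hb0] at hflag ⊢
      have hlen_eq : new.length = (pd.getD p []).length := by
        simpa using hb0
      obtain ⟨hInv1, hsubnew⟩ := pvInv_set cfg hPre hInv hp
      rw [← hpd1] at hInv1
      have hmemeq_new : ∀ y, y ∈ pd.getD p [] ↔ y ∈ new :=
        pvMemEq_of_subset_len (pvNew_nodup cfg pd p) hsubnew (le_of_eq hlen_eq.symm)
      have hmemeq1 : ∀ j < cfg.length, ∀ y, y ∈ pd1.getD j [] ↔ y ∈ pd.getD j [] := by
        intro j _ y
        by_cases hpj : p = j
        · subst hpj; rw [hpd1, pvGetD_set_self pd p new [] hplen]; exact (hmemeq_new y).symm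
        · rw [hpd1, pvGetD_set_ne pd new [] hpj]
      obtain ⟨ih1, ih2, ih3⟩ := ih (fun q hq => hl q (List.mem_cons_of_mem _ hq))
        (List.Nodup.of_cons hnd) pd1 hInv1 hflag
      refine ⟨?_, ?_, ?_⟩
      · intro j hj
        rw [ih1 j (fun h => hj (List.mem_cons_of_mem _ h)), hpd1,
          pvGetD_set_ne pd new [] (fun h => hj (by rw [← h]; exact List.mem_cons_self ..))]
      · intro j hj y
        exact (ih2 j hj y).trans (hmemeq1 j hj y)
      · intro q hq
        rcases List.mem_cons.1 hq with rfl | hq'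
        · rw [ih1 q (List.Nodup.notMem hnd), hpd1, pvGetD_set_self pd q new [] hplen]
        · rw [ih3 q hq', pvNewNodes_congr cfg hPre hInv.1 (by simp [hpd1, hInv.1]) hmemeq1 q]

theorem pvSweep_decrease (cfg : List (List (Option Int)))
    (hPre : Pre_get_post_dominating_nodes cfg) :
    ∀ (l : List Nat), (∀ p ∈ l, p < cfg.length) →
      ∀ pd, pvInv cfg pd →
        (l.foldl (pvStepA cfg) (pd, false)).2 = true →
        pvMu (l.foldl (pvStepA cfg) (pd, false)).1 < pvMu pd := by
  intro l
  induction l with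
  | nil => intro _ pd _ h; simp at h
  | cons p rest ih =>
      intro hl pd hInv hflag
      have hp : p < cfg.length := hl p (List.mem_cons_self ..)
      have hplen : p < pd.length := by rw [hInv.1]; exact hp
      simp only [List.foldl_cons, pvStepA_def, Bool.false_or] at hflag ⊢
      set new := PySem.Set.add (pvNewNodes cfg pd p) (some (p : Int)) with hnewdef
      set pd1 := pd.set p new with hpd1
      obtain ⟨hInv1, hsubnew⟩ := pvInv_set cfg hPre hInv hp
      rw [← hpd1] at hInv1
      have hle : new.length ≤ (pd.getD p []).length :=
        (List.subperm_of_subset (pvNew_nodup cfg pd p) hsubnew).length_le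
      have hmu := pvMu_set pd p new hplen
      rw [← hpd1] at hmu
      rcases Bool.eq_false_or_eq_true (!(new.length == (pd.getD p []).length)) with hb0 | hb0
      · rw [hb0] at hflag ⊢
        have hne : new.length ≠ (pd.getD p []).length := by simpa using hb0
        have hmult : pvMu pd1 < pvMu pd := by omega
        have hrest := (pvSweep_inv_mu cfg hPre rest (fun q hq => hl q (List.mem_cons_of_mem _ hq))
          pd1 true hInv1).2
        omega
      · rw [hb0] at hflag ⊢
        have heq : new.length = (pd.getD p []).length := by simpa using hb0
        have hmueq : pvMu pd1 = pvMu pd := by omega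
        have := ih (fun q hq => hl q (List.mem_cons_of_mem _ hq)) pd1 hInv1 hflag
        omega


-- ---------- B's escape fixpoint ----------
theorem pvEscStep_length (cfg : List (List (Option Int))) (x : Nat) (esc : List Bool) :
    (pvEscStep cfg x esc).length = cfg.length := by
  unfold pvEscStep; simp

theorem pvIterE_length (cfg : List (List (Option Int))) (x : Nat) :
    ∀ k, ((pvEscStep cfg x)^[k] (List.replicate cfg.length false)).length = cfg.length := by
  intro k
  cases k with
  | zero => simp
  | succ m => rw [Function.iterate_succ_apply']; exact pvEscStep_length cfg x _

theorem pvEscStep_getD (cfg : List (List (Option Int))) (x : Nat) (esc : List Bool)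
    {i : Nat} (hi : i < cfg.length) :
    (pvEscStep cfg x esc).getD i false
      = (decide (i ≠ x) && (cfg.getD i []).any (fun s =>
          match s with
          | none => true
          | some v => PySem.List.pyGetD esc v false)) := by
  unfold pvEscStep
  rw [List.getD_eq_getElem _ _ (by simpa using hi), List.getElem_map, List.getElem_range]

theorem pvGetD_false_of_ge {l : List Bool} {n i : Nat} (hlen : l.length = n) (h : n ≤ i) :
    l.getD i false = false := List.getD_eq_default _ _ (by omega)

theorem pvEscStep_mono (cfg : List (List (Option Int))) (x : Nat)
    (hPre : Pre_get_post_dominating_nodes cfg) {esc esc' : List Bool}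
    (hlen : esc.length = cfg.length) (hlen' : esc'.length = cfg.length)
    (hmono : ∀ w, esc.getD w false = true → esc'.getD w false = true) :
    ∀ i, (pvEscStep cfg x esc).getD i false = true →
      (pvEscStep cfg x esc').getD i false = true := by
  intro i hi
  by_cases hin : i < cfg.length
  · rw [pvEscStep_getD cfg x esc hin] at hi
    rw [pvEscStep_getD cfg x esc' hin]
    simp only [Bool.and_eq_true, List.any_eq_true] at hi ⊢
    obtain ⟨hne, s, hs, hb⟩ := hi
    refine ⟨hne, s, hs, ?_⟩
    cases s with
    | none => rfl
    | some v =>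
        rcases pvPre_valid hPre i _ hs with h | ⟨t, heq, hb1, hb2⟩
        · exact absurd h (by simp)
        · have ht : t = v := (Option.some.inj heq).symm
          subst ht
          show PySem.List.pyGetD esc' t false = true
          rw [pvPyGetD_idx' esc' hlen' t false hb1 hb2]
          apply hmono
          rw [← pvPyGetD_idx' esc hlen t false hb1 hb2]
          exact hb
  · rw [pvGetD_false_of_ge (pvEscStep_length cfg x esc) (by omega)] at hi
    exact absurd hi (by simp)

theorem pvReplicate_getD_false (n w : Nat) :
    (List.replicate n false).getD w false = false := by
  by_cases hw : w < n
  · exact List.getD_replicate _ hw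
  · exact pvGetD_false_of_ge (n := n) (by simp) (by omega)

theorem pvEscChain (cfg : List (List (Option Int))) (x : Nat)
    (hPre : Pre_get_post_dominating_nodes cfg) :
    ∀ k w, ((pvEscStep cfg x)^[k] (List.replicate cfg.length false)).getD w false = true →
      ((pvEscStep cfg x)^[k + 1] (List.replicate cfg.length false)).getD w false = true := by
  intro k
  induction k with
  | zero =>
      intro w hw
      rw [Function.iterate_zero_apply, pvReplicate_getD_false] at hw
      exact absurd hw (by simp)
  | succ m ih =>
      intro w hw
      rw [Function.iterate_succ_apply'] at hw
      rw [Function.iterate_succ_apply']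
      exact pvEscStep_mono cfg x hPre (pvIterE_length cfg x m) (pvIterE_length cfg x (m + 1))
        ih w hw

theorem pvCount_mono : ∀ (l l' : List Bool), l.length = l'.length →
    (∀ i, l.getD i false = true → l'.getD i false = true) →
    l.count true ≤ l'.count true := by
  intro l
  induction l with
  | nil => intro l' _ _; simp
  | cons a tl ih =>
      intro l' hlen hmono
      cases l' with
      | nil => simp at hlen
      | cons b tl' =>
          have hhead : a = true → b = true := fun ha => by simpa [ha] using hmono 0
          have htail := ih tl' (by simpa using hlen) (fun i hi => by
            have := hmono (i + 1); simpa using this (by simpa using hi))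
          simp only [List.count_cons]
          cases a <;> cases b <;> simp_all <;> omega

theorem pvEq_of_count : ∀ (l l' : List Bool), l.length = l'.length →
    (∀ i, l.getD i false = true → l'.getD i false = true) →
    l'.count true ≤ l.count true → l = l' := by
  intro l
  induction l with
  | nil => intro l' hlen _ _; cases l' with
      | nil => rfl
      | cons b tl' => simp at hlen
  | cons a tl ih =>
      intro l' hlen hmono hcnt
      cases l' with
      | nil => simp at hlen
      | cons b tl' =>
          have hhead : a = true → b = true := fun ha => by simpa [ha] using hmono 0
          have htailmono : ∀ i, tl.getD i false = true → tl'.getD i false = true :=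
            fun i hi => by
              have := hmono (i + 1); simpa using this (by simpa using hi)
          have htaillen : tl.length = tl'.length := by simpa using hlen
          have htaille := pvCount_mono tl tl' htaillen htailmono
          have hab : a = b := by
            cases a <;> cases b <;> simp_all <;> omega
          subst hab
          have : tl'.count true ≤ tl.count true := by
            cases a <;> simp_all
          rw [ih tl' htaillen htailmono this]

theorem pvEscStab (cfg : List (List (Option Int))) (x : Nat)
    (hPre : Pre_get_post_dominating_nodes cfg) :
    (pvEscStep cfg x)^[cfg.length] (List.replicate cfg.length false)
      = (pvEscStep cfg x)^[cfg.length + 1] (List.replicate cfg.length false) := by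
  have aux : ∀ k : Nat,
      ((pvEscStep cfg x)^[k] (List.replicate cfg.length false)
        = (pvEscStep cfg x)^[k + 1] (List.replicate cfg.length false))
      ∨ k ≤ ((pvEscStep cfg x)^[k] (List.replicate cfg.length false)).count true := by
    intro k
    induction k with
    | zero => exact Or.inr (Nat.zero_le _)
    | succ m ihm =>
        have hprop : ((pvEscStep cfg x)^[m] (List.replicate cfg.length false)
              = (pvEscStep cfg x)^[m + 1] (List.replicate cfg.length false)) →
            ((pvEscStep cfg x)^[m + 1] (List.replicate cfg.length false)
              = (pvEscStep cfg x)^[m + 2] (List.replicate cfg.length false)) := by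
          intro h
          calc (pvEscStep cfg x)^[m + 1] (List.replicate cfg.length false)
              = pvEscStep cfg x ((pvEscStep cfg x)^[m] (List.replicate cfg.length false)) :=
                Function.iterate_succ_apply' _ _ _
            _ = pvEscStep cfg x ((pvEscStep cfg x)^[m + 1] (List.replicate cfg.length false)) := by
                rw [← h]
            _ = (pvEscStep cfg x)^[m + 2] (List.replicate cfg.length false) :=
                (Function.iterate_succ_apply' _ _ _).symm
        rcases ihm with h | h
        · exact Or.inl (hprop h)
        · by_cases hm : (pvEscStep cfg x)^[m] (List.replicate cfg.length false)
              = (pvEscStep cfg x)^[m + 1] (List.replicate cfg.length false)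
          · exact Or.inl (hprop hm)
          · right
            have hlt : ¬ ((pvEscStep cfg x)^[m + 1]
                  (List.replicate cfg.length false)).count true
                ≤ ((pvEscStep cfg x)^[m] (List.replicate cfg.length false)).count true :=
              fun hle => hm (pvEq_of_count _ _
                ((pvIterE_length cfg x m).trans (pvIterE_length cfg x (m + 1)).symm)
                (pvEscChain cfg x hPre m) hle)
            omega
  rcases aux cfg.length with h | h
  · exact h
  · have h1 : ((pvEscStep cfg x)^[cfg.length] (List.replicate cfg.length false)).count true
        ≤ cfg.length := by
      have := List.count_le_length
        (l := (pvEscStep cfg x)^[cfg.length] (List.replicate cfg.length false)) (a := true)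
      rw [pvIterE_length cfg x cfg.length] at this
      exact this
    have h2 : ((pvEscStep cfg x)^[cfg.length + 1] (List.replicate cfg.length false)).count true
        ≤ cfg.length := by
      have := List.count_le_length
        (l := (pvEscStep cfg x)^[cfg.length + 1] (List.replicate cfg.length false)) (a := true)
      rw [pvIterE_length cfg x (cfg.length + 1)] at this
      exact this
    exact pvEq_of_count _ _
      ((pvIterE_length cfg x cfg.length).trans (pvIterE_length cfg x (cfg.length + 1)).symm)
      (pvEscChain cfg x hPre cfg.length) (by omega)

theorem pvEscSound (cfg : List (List (Option Int))) (x : Nat)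
    (hPre : Pre_get_post_dominating_nodes cfg) :
    ∀ (k : Nat) (i : Nat),
      ((pvEscStep cfg x)^[k] (List.replicate cfg.length false)).getD i false = true →
      pvEsc cfg x i := by
  intro k
  induction k with
  | zero =>
      intro i hi
      rw [Function.iterate_zero_apply, pvReplicate_getD_false] at hi
      exact absurd hi (by simp)
  | succ m ih =>
      intro i hi
      rw [Function.iterate_succ_apply'] at hi
      by_cases hin : i < cfg.length
      · rw [pvEscStep_getD cfg x _ hin] at hi
        simp only [Bool.and_eq_true, decide_eq_true_eq, List.any_eq_true] at hi
        obtain ⟨hne, s, hs, hb⟩ := hi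
        cases s with
        | none => exact pvEsc.exit i hne hs
        | some v =>
            rcases pvPre_valid hPre i _ hs with h | ⟨t, heq, hb1, hb2⟩
            · exact absurd h (by simp)
            · have ht : t = v := (Option.some.inj heq).symm
              subst ht
              have hb' : PySem.List.pyGetD ((pvEscStep cfg x)^[m]
                  (List.replicate cfg.length false)) t false = true := hb
              rw [pvPyGetD_idx' _ (pvIterE_length cfg x m) t false hb1 hb2] at hb'
              exact pvEsc.step i t hne hs (ih _ hb')
      · rw [pvGetD_false_of_ge (pvEscStep_length cfg x _) (by omega)] at hi
        exact absurd hi (by simp)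

theorem pvEscComplete (cfg : List (List (Option Int)))
    (hPre : Pre_get_post_dominating_nodes cfg) (x : Nat) :
    ∀ j : Nat, pvEsc cfg x j →
      ((pvEscStep cfg x)^[cfg.length] (List.replicate cfg.length false)).getD j false
        = true := by
  intro j hj
  induction hj with
  | exit i hne hmem =>
      rw [pvEscStab cfg x hPre, Function.iterate_succ_apply',
        pvEscStep_getD cfg x _ (pvRow_nonempty_lt hmem)]
      simp only [Bool.and_eq_true, decide_eq_true_eq, List.any_eq_true]
      exact ⟨hne, none, hmem, rfl⟩
  | step i t hne hmem hjm ih =>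
      rcases pvPre_valid hPre i _ hmem with h | ⟨t', heq, hb1, hb2⟩
      · exact absurd h (by simp)
      · have ht : t' = t := (Option.some.inj heq).symm
        subst ht
        rw [pvEscStab cfg x hPre, Function.iterate_succ_apply',
          pvEscStep_getD cfg x _ (pvRow_nonempty_lt hmem)]
        simp only [Bool.and_eq_true, decide_eq_true_eq, List.any_eq_true]
        refine ⟨hne, some t', hmem, ?_⟩
        show PySem.List.pyGetD ((pvEscStep cfg x)^[cfg.length]
            (List.replicate cfg.length false)) t' false = true
        rw [pvPyGetD_idx' _ (pvIterE_length cfg x cfg.length) t' false hb1 hb2]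
        exact ih

theorem pvEscIff (cfg : List (List (Option Int)))
    (hPre : Pre_get_post_dominating_nodes cfg) (x j : Nat) :
    ((pvEscStep cfg x)^[cfg.length] (List.replicate cfg.length false)).getD j false = true
      ↔ pvEsc cfg x j :=
  ⟨pvEscSound cfg x hPre cfg.length j, pvEscComplete cfg hPre x j⟩

theorem pvConstFrom (cfg : List (List (Option Int))) (x : Nat) {k : Nat}
    (hstable : (pvEscStep cfg x)^[k] (List.replicate cfg.length false)
      = (pvEscStep cfg x)^[k + 1] (List.replicate cfg.length false)) :
    ∀ m : Nat, (pvEscStep cfg x)^[k + m] (List.replicate cfg.length false)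
      = (pvEscStep cfg x)^[k] (List.replicate cfg.length false) := by
  intro m
  induction m with
  | zero => rfl
  | succ m' ih =>
      calc (pvEscStep cfg x)^[k + (m' + 1)] (List.replicate cfg.length false)
          = pvEscStep cfg x ((pvEscStep cfg x)^[k + m'] (List.replicate cfg.length false)) := by
            rw [show k + (m' + 1) = (k + m') + 1 by omega]
            exact Function.iterate_succ_apply' _ _ _
        _ = pvEscStep cfg x ((pvEscStep cfg x)^[k] (List.replicate cfg.length false)) := by
            rw [ih]
        _ = (pvEscStep cfg x)^[k + 1] (List.replicate cfg.length false) :=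
            (Function.iterate_succ_apply' _ _ _).symm
        _ = (pvEscStep cfg x)^[k] (List.replicate cfg.length false) := hstable.symm

theorem pvStableVal (cfg : List (List (Option Int))) (x : Nat)
    (hPre : Pre_get_post_dominating_nodes cfg) {k : Nat}
    (hstable : (pvEscStep cfg x)^[k] (List.replicate cfg.length false)
      = (pvEscStep cfg x)^[k + 1] (List.replicate cfg.length false)) :
    (pvEscStep cfg x)^[k] (List.replicate cfg.length false)
      = (pvEscStep cfg x)^[cfg.length] (List.replicate cfg.length false) := by
  rcases Nat.le_total k cfg.length with hkn | hkn
  · have h := pvConstFrom cfg x hstable (cfg.length - k)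
    rw [show k + (cfg.length - k) = cfg.length from by omega] at h
    exact h.symm
  · have h := pvConstFrom cfg x (pvEscStab cfg x hPre) (k - cfg.length)
    rw [show cfg.length + (k - cfg.length) = k from by omega] at h
    exact h

theorem pvEscLoop_eq (cfg : List (List (Option Int))) (x : Nat)
    (hPre : Pre_get_post_dominating_nodes cfg) :
    ∀ (f k : Nat), cfg.length ≤ k + f →
      pvEscLoop cfg x f ((pvEscStep cfg x)^[k] (List.replicate cfg.length false))
        = (pvEscStep cfg x)^[cfg.length] (List.replicate cfg.length false) := by
  intro f
  induction f with
  | zero =>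
      intro k hk
      show (pvEscStep cfg x)^[k] (List.replicate cfg.length false) = _
      have h := pvConstFrom cfg x (pvEscStab cfg x hPre) (k - cfg.length)
      rw [show cfg.length + (k - cfg.length) = k from by omega] at h
      exact h
  | succ f' ih =>
      intro k hk
      show (let new := pvEscStep cfg x ((pvEscStep cfg x)^[k] (List.replicate cfg.length false));
        if new == (pvEscStep cfg x)^[k] (List.replicate cfg.length false)
        then (pvEscStep cfg x)^[k] (List.replicate cfg.length false)
        else pvEscLoop cfg x f' new) = _
      simp only
      by_cases hbeq : pvEscStep cfg x ((pvEscStep cfg x)^[k] (List.replicate cfg.length false))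
          = (pvEscStep cfg x)^[k] (List.replicate cfg.length false)
      · rw [if_pos (by simpa using hbeq)]
        exact pvStableVal cfg x hPre
          ((Function.iterate_succ_apply' (pvEscStep cfg x) k _ ▸ hbeq).symm)
      · rw [if_neg (by simpa using hbeq)]
        rw [← Function.iterate_succ_apply' (pvEscStep cfg x) k]
        exact ih (k + 1) (by omega)

theorem pvEscapes_getD (cfg : List (List (Option Int)))
    (hPre : Pre_get_post_dominating_nodes cfg) {x : Nat} (hx : x < cfg.length) :
    (pvEscapes cfg).getD x [] = (pvEscStep cfg x)^[cfg.length] (List.replicate cfg.length false) := by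
  unfold pvEscapes
  rw [List.getD_eq_getElem _ _ (by simpa using hx)]
  rw [List.getElem_map, List.getElem_range]
  have h0 : (List.replicate cfg.length false)
      = (pvEscStep cfg x)^[0] (List.replicate cfg.length false) := rfl
  rw [h0]
  exact pvEscLoop_eq cfg x hPre (cfg.length + 1) 0 (by omega)

-- ---------- the stable state is the escape characterization ----------
theorem pvEscNotMem (cfg : List (List (Option Int)))
    (hPre : Pre_get_post_dominating_nodes cfg) {pd : List (PySem.Set (Option Int))}
    (hlen : pd.length = cfg.length)
    (hfix : ∀ p < cfg.length, ∀ y, y ∈ pd.getD p [] ↔ pvFmem cfg pd p y) :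
    ∀ (x j : Nat), pvEsc cfg x j → some (x : Int) ∉ pd.getD j [] := by
  intro x j hj
  induction hj with
  | exit i hne hmem =>
      intro hmemx
      rcases (hfix i (pvRow_nonempty_lt hmem) _).1 hmemx with heq | ⟨_, hall⟩
      · exact hne (by simpa using heq.symm)
      · have := hall none hmem
        simp [pvMemRow] at this
  | step i t hne hmem hjm ih =>
      intro hmemx
      rcases (hfix i (pvRow_nonempty_lt hmem) _).1 hmemx with heq | ⟨_, hall⟩
      · exact hne (by simpa using heq.symm)
      · have hm := hall _ hmem
        rcases pvPre_valid hPre i _ hmem with h | ⟨t', heq', hb1, hb2⟩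
        · exact absurd h (by simp)
        · have ht : t' = t := (Option.some.inj heq').symm
          subst ht
          rw [pvMemRow_some pd hlen hb1 hb2] at hm
          exact ih hm

theorem pvFix_Tmem (cfg : List (List (Option Int)))
    (hPre : Pre_get_post_dominating_nodes cfg) {pd : List (PySem.Set (Option Int))}
    (hInv : pvInv cfg pd)
    (hfix : ∀ p < cfg.length, ∀ y, y ∈ pd.getD p [] ↔ pvFmem cfg pd p y) :
    ∀ j < cfg.length, ∀ y, y ∈ pd.getD j [] ↔ pvTmem cfg j y := by
  intro j hj y
  constructor
  · intro hy
    rcases (mem_pvAllNodes cfg.length y).1 ((hInv.2 j hj).2.1 y hy) with rfl | ⟨x, hx, rfl⟩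
    · exact Or.inl rfl
    · refine Or.inr ⟨x, hx, rfl, fun hesc => pvEscNotMem cfg hPre hInv.1 hfix x j hesc hy⟩
  · exact (hInv.2 j hj).2.2.1 y

theorem pvRow_eq (cfg : List (List (Option Int)))
    (hPre : Pre_get_post_dominating_nodes cfg) {pd : List (PySem.Set (Option Int))}
    (hInv : pvInv cfg pd)
    (hfix : ∀ p < cfg.length, ∀ y, y ∈ pd.getD p [] ↔ pvFmem cfg pd p y)
    {p : Nat} :
    PySem.Set.add (pvNewNodes cfg pd p) (some (p : Int)) = pvRowB cfg (pvEscapes cfg) p := by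
  have hT := pvFix_Tmem cfg hPre hInv hfix
  have hnone : ∀ j < cfg.length, none ∈ pd.getD j [] :=
    fun j hj => (hT j hj none).2 (Or.inl rfl)
  -- pointwise agreement of the two filter conditions
  have hkey : ∀ x : Nat, x < cfg.length → ∀ s ∈ cfg.getD p [],
      ((pvGRow pd s).contains (some (x : Int)) = true
        ↔ (match s with
            | none => false
            | some v => !(PySem.List.pyGetD ((pvEscapes cfg).getD x []) v false)) = true) := by
    intro x hx s hs
    rcases pvPre_valid hPre p s hs with rfl | ⟨t, rfl, hb1, hb2⟩
    · simp [pvGRow]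
    · show (PySem.List.pyGetD pd t []).contains (some (x : Int)) = true
        ↔ (!(PySem.List.pyGetD ((pvEscapes cfg).getD x []) t false)) = true
      rw [pvPyGetD_idx' pd hInv.1 t [] hb1 hb2, PySem.Set.contains_iff,
        hT _ (pvIdx_lt _ _ hb1 hb2), pvEscapes_getD cfg hPre hx,
        pvPyGetD_idx' _ (pvIterE_length cfg x cfg.length) t false hb1 hb2,
        Bool.not_eq_true', ← Bool.not_eq_true, pvEscIff cfg hPre x _]
      constructor
      · intro hTm hesc
        rcases hTm with h | ⟨x', _, heq, hnesc⟩
        · simp at h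
        · have hxx : x' = x := by
            have := Option.some.inj heq
            omega
          subst hxx
          exact hnesc hesc
      · intro hnesc
        exact Or.inr ⟨x, hx, rfl, hnesc⟩
  -- condition on None holds
  have hcnone : ((cfg.getD p []).all (fun s => (pvGRow pd s).contains none)) = true := by
    rw [List.all_eq_true]
    intro s hs
    rcases pvPre_valid hPre p s hs with rfl | ⟨t, rfl, hb1, hb2⟩
    · simp [pvGRow]
    · show (PySem.List.pyGetD pd t []).contains none = true
      rw [pvPyGetD_idx' pd hInv.1 t [] hb1 hb2, PySem.Set.contains_iff]
      exact hnone _ (pvIdx_lt _ _ hb1 hb2)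
  have hfiltnone :
      List.filter (fun y => (cfg.getD p []).all fun s => (pvGRow pd s).contains y) [none]
        = [none] := by
    have h' : ∀ s ∈ cfg.getD p [], none ∈ pvGRow pd s :=
      fun s hs => (PySem.Set.contains_iff _ _).1 (List.all_eq_true.1 hcnone s hs)
    simp [List.filter_cons]
    exact h'
  -- right-hand side as a concrete list
  unfold pvRowB
  have hbasend : (((List.range cfg.length).filter (fun x =>
      (cfg.getD p []).all (fun s =>
        match s with
        | none => false
        | some v => !(PySem.List.pyGetD ((pvEscapes cfg).getD x []) v false)))).map
          (fun (x : Nat) => some (x : Int))).Nodup :=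
    List.Nodup.map (by intro a b hab; simpa using hab) (List.Nodup.filter _ List.nodup_range)
  have hfilt : List.filter
        ((fun y => (cfg.getD p []).all fun s => (pvGRow pd s).contains y)
          ∘ fun (i : Nat) => some (i : Int)) (List.range cfg.length)
      = List.filter (fun x => (cfg.getD p []).all fun s =>
          match s with
          | none => false
          | some v => !(PySem.List.pyGetD ((pvEscapes cfg).getD x []) v false)) (List.range cfg.length) := by
    apply List.filter_congr
    intro x hx
    have hxlt : x < cfg.length := List.mem_range.1 hx
    apply pvBool_eq_of_iff
    show ((cfg.getD p []).all fun s => (pvGRow pd s).contains (some (x : Int))) = true ↔ _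
    rw [List.all_eq_true, List.all_eq_true]
    constructor
    · exact fun h s hs => (hkey x hxlt s hs).1 (h s hs)
    · exact fun h s hs => (hkey x hxlt s hs).2 (h s hs)
  refine congrArg (fun t => PySem.Set.add t (some ((p : Nat) : Int))) ?_
  rw [pvNewNodes_eq, pvAllNodes_eq, List.filter_append, List.filter_map, hfiltnone]
  rw [PySem.Set.ofList_eq_self_of_nodup _ hbasend, PySem.Set.add_of_not_mem (by simp)]
  rw [hfilt]


-- ---------- the main loop reaches the stable state and equals B ----------
theorem pvLoopA_succ (cfg : List (List (Option Int))) (f : Nat)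
    (pd : List (PySem.Set (Option Int))) :
    pvLoopA cfg (f + 1) pd
      = if (pvSweepA cfg pd).2 then pvLoopA cfg f (pvSweepA cfg pd).1
        else (pvSweepA cfg pd).1 := rfl

theorem pvLoop_eq (cfg : List (List (Option Int)))
    (hPre : Pre_get_post_dominating_nodes cfg) :
    ∀ (fuel : Nat) (pd : List (PySem.Set (Option Int))), pvInv cfg pd → pvMu pd < fuel →
      pvLoopA cfg fuel pd = (List.range cfg.length).map (pvRowB cfg (pvEscapes cfg)) := by
  intro fuel
  induction fuel with
  | zero => intro pd _ h; omega
  | succ f ih =>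
      intro pd hInv hmu
      have hrange : ∀ p ∈ List.range cfg.length, p < cfg.length :=
        fun p hp => List.mem_range.1 hp
      have hlen : pd.length = cfg.length := hInv.1
      have hsw : pvSweepA cfg pd = (List.range cfg.length).foldl (pvStepA cfg) (pd, false) := by
        unfold pvSweepA; rw [hlen]
      rw [pvLoopA_succ]
      rcases Bool.eq_false_or_eq_true (pvSweepA cfg pd).2 with hflag | hflag
      · rw [hflag, if_pos rfl]
        have h1 := pvSweep_inv_mu cfg hPre (List.range cfg.length) hrange pd false hInv
        rw [← hsw] at h1
        have h2 := pvSweep_decrease cfg hPre (List.range cfg.length) hrange pd hInv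
          (by rw [← hsw]; exact hflag)
        rw [← hsw] at h2
        exact ih (pvSweepA cfg pd).1 h1.1 (by omega)
      · rw [hflag, if_neg (by simp)]
        obtain ⟨ih1, ih2, ih3⟩ := pvSweep_stable cfg hPre (List.range cfg.length) hrange
          List.nodup_range pd hInv (by rw [← hsw]; exact hflag)
        rw [← hsw] at ih1 ih2 ih3
        have hfix : ∀ p < cfg.length, ∀ y, y ∈ pd.getD p [] ↔ pvFmem cfg pd p y := by
          intro p hp y
          have hrow := ih3 p (List.mem_range.2 hp)
          have hm := ih2 p hp y
          rw [hrow] at hm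
          exact Iff.trans hm.symm (mem_pvNew cfg pd p y)
        have hswlen : (pvSweepA cfg pd).1.length = cfg.length := by
          rw [hsw]
          exact (pvSweep_inv_mu cfg hPre (List.range cfg.length) hrange pd false hInv).1.1
        apply List.ext_getElem
        · rw [hswlen]; simp
        · intro i hi hi2
          have hiN : i < cfg.length := by rwa [hswlen] at hi
          have hgd : (pvSweepA cfg pd).1[i] = (pvSweepA cfg pd).1.getD i [] := by
            rw [List.getD_eq_getElem _ _ hi]
          rw [hgd, ih3 i (List.mem_range.2 hiN), pvRow_eq cfg hPre hInv hfix (p := i)]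
          rw [List.getElem_map, List.getElem_range]

theorem pvInit_inv (cfg : List (List (Option Int))) :
    pvInv cfg (List.replicate cfg.length (pvAllNodes cfg.length)) := by
  refine ⟨by simp, fun j hj => ?_⟩
  rw [List.getD_replicate _ hj]
  refine ⟨pvAllNodes_nodup _, fun y hy => hy, ?_, ?_⟩
  · intro y hy
    rcases hy with rfl | ⟨x, hx, rfl, _⟩
    · exact (mem_pvAllNodes _ _).2 (Or.inl rfl)
    · exact (mem_pvAllNodes _ _).2 (Or.inr ⟨x, hx, rfl⟩)
  · intro y hy
    rcases hy with rfl | ⟨hy, _⟩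
    · exact (mem_pvAllNodes _ _).2 (Or.inr ⟨j, hj, rfl⟩)
    · exact hy

theorem pvAllNodes_length (n : Nat) : (pvAllNodes n).length = n + 1 := by
  rw [pvAllNodes_eq]; simp

theorem pvMu_init (cfg : List (List (Option Int))) :
    pvMu (List.replicate cfg.length (pvAllNodes cfg.length)) = cfg.length * (cfg.length + 1) := by
  unfold pvMu
  rw [List.map_replicate, List.sum_replicate, pvAllNodes_length]
  simp

-- ===== VERDICT (by name: the statement is the Claim_ definition above) =====
theorem get_post_dominating_nodes_spec : Claim_equal_get_post_dominating_nodes := by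
  intro cfg hDom hPre
  show get_post_dominating_nodes cfg = get_post_dominating_nodes_alt cfg
  show pvLoopA cfg (cfg.length * cfg.length + cfg.length + 1)
      (List.replicate cfg.length (pvAllNodes cfg.length))
    = (List.range cfg.length).map (pvRowB cfg (pvEscapes cfg))
  apply pvLoop_eq cfg hPre
  · exact pvInit_inv cfg
  · rw [pvMu_init]
    have := cfg.length
    nlinarith [cfg.length]
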